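-- pv_equiv track=rewrite | github.com/lvpengcheng/DataMerge | backend/ai_engine/formula_code_generator.py | _extract_relevant_rules
-- ===== SOURCE A (Python) =====
-- from typing import Dict, List, Any, Optional, Tuple
--
-- def _extract_relevant_rules(rules_content: str, column_names: List[str]) -> str:
--     """从规则内容中提取与指定列名相关的规则段落"""
--     if not rules_content:
--         return ""
--
--     lines = rules_content.split('\n')
--     relevant_lines = []
--     include_next = False
--
--     for line in lines:
--         # 检查这行是否提到了任何缺失列
--         is_relevant = any(col_name in line for col_name in column_names)
--
--         if is_relevant:
--             include_next = True
--             relevant_lines.append(line)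
--         elif include_next:
--             # 包含相关行之后的连续非空行（同一规则段落）
--             if line.strip():
--                 relevant_lines.append(line)
--             else:
--                 include_next = False
--                 relevant_lines.append('')
--
--     result = '\n'.join(relevant_lines).strip()
--     # 限制长度
--     if len(result) > 70000:
--         result = result[:70000] + "\n... (规则过长已截断)"
--     return result if result else rules_content[:70000]
-- ===== SOURCE B (Python) =====
-- from typing import List
--
-- def _extract_relevant_rules(rules_content: str, column_names: List[str]) -> str:
--     """Interval-cover formulation: mark each relevant line, extend its paragraph
--     to the first following blank line, and keep the union of those intervals."""
--     if not rules_content: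
--         return ""
--
--     lines = rules_content.split('\n')
--     n = len(lines)
--
--     # nxt[i] = index of the first blank line strictly after i (capped at n - 1)
--     nxt = [0] * n
--     first_blank = n - 1
--     for i in range(n - 1, -1, -1):
--         nxt[i] = first_blank
--         if not lines[i].strip():
--             first_blank = i
--
--     pieces = []
--     reach = -1  # rightmost line covered by a paragraph started so far
--     for i in range(n):
--         line = lines[i]
--         if any(col in line for col in column_names):
--             pieces.append(line)
--             if nxt[i] > reach:
--                 reach = nxt[i]
--         elif i <= reach:
--             pieces.append(line if line.strip() else '')
--
--     result = '\n'.join(pieces).strip()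
--     if len(result) > 70000:
--         result = result[:70000] + "\n... (规则过长已截断)"
--     return result if result else rules_content[:70000]
-- ===== Notes on version B (the rewrite author's own statement) =====
-- stated objective: alternative
-- what changed: A's fused include_next state machine is replaced by an interval-cover algorithm: a backward pass precomputes the first blank line after each index, then a forward pass keeps every line covered by a paragraph interval [relevant line, next blank], maintaining only a numeric 'reach' bound.
import Mathlib
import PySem

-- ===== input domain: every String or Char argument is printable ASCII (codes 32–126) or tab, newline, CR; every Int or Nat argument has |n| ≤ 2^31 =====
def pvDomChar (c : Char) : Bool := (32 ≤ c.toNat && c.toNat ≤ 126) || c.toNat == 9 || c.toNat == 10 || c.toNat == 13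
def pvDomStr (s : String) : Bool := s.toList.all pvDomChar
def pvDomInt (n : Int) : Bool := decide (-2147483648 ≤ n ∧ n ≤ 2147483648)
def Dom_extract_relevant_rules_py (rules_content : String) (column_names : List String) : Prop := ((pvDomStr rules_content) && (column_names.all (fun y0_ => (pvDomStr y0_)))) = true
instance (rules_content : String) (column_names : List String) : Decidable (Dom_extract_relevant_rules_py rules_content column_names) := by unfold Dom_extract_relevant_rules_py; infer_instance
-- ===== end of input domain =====

-- B replaces A's include_next state machine by an interval-cover algorithm (backward pass
-- computing the first blank line after each index, forward pass keeping lines covered by a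
-- paragraph interval started at a relevant line); alternative structure, same asymptotic cost.

-- ===== PORT A =====
-- loop body of A's single for-loop: state = (include_next, relevant_lines)
def pvA_step (column_names : List String) (st : Bool × List String) (line : String) : Bool × List String :=
  if column_names.any (fun col => PySem.Str.isIn col line) then
    (true, st.2 ++ [line])
  else if st.1 then
    (if PySem.Str.strip line ≠ "" then (true, st.2 ++ [line]) else (false, st.2 ++ [""]))
  else st

def extract_relevant_rules_py (rules_content : String) (column_names : List String) : String :=
  if rules_content = "" then ""
  else
    let lines := (PySem.Str.split? rules_content "\n").getD []
    let st := lines.foldl (pvA_step column_names) (false, [])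
    let result := PySem.Str.strip (PySem.Str.join "\n" st.2)
    let result := if 70000 < PySem.Str.len result
      then PySem.Str.slice result none (some 70000) ++ "\n... (规则过长已截断)"
      else result
    if result ≠ "" then result else PySem.Str.slice rules_content none (some 70000)

-- ===== PORT B =====
-- body of B's backward loop: state = (nxt, first_blank); nxt[i] := first_blank, then update
def pvB_back (lines : List String) (st : List Int × Int) (i : Int) : List Int × Int :=
  (st.1.set i.toNat st.2,
   if PySem.Str.strip (PySem.List.pyGetD lines i "") = "" then i else st.2)

-- body of B's forward loop: state = (pieces, reach)
def pvB_step (column_names : List String) (lines : List String) (nxt : List Int)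
    (st : List String × Int) (i : Int) : List String × Int :=
  let line := PySem.List.pyGetD lines i ""
  if column_names.any (fun col => PySem.Str.isIn col line) then
    (st.1 ++ [line],
     if st.2 < PySem.List.pyGetD nxt i 0 then PySem.List.pyGetD nxt i 0 else st.2)
  else if i ≤ st.2 then
    (st.1 ++ [if PySem.Str.strip line ≠ "" then line else ""], st.2)
  else st

def extract_relevant_rules_py_alt (rules_content : String) (column_names : List String) : String :=
  if rules_content = "" then ""
  else
    let lines := (PySem.Str.split? rules_content "\n").getD []
    let n : Int := (lines.length : Int)
    let back := (PySem.List.pyRange (n - 1) (-1) (-1)).foldl (pvB_back lines)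
      (List.replicate lines.length 0, n - 1)
    let st := (PySem.List.pyRange 0 n).foldl (pvB_step column_names lines back.1) ([], -1)
    let result := PySem.Str.strip (PySem.Str.join "\n" st.1)
    let result := if 70000 < PySem.Str.len result
      then PySem.Str.slice result none (some 70000) ++ "\n... (规则过长已截断)"
      else result
    if result ≠ "" then result else PySem.Str.slice rules_content none (some 70000)

-- ===== PRECONDITION & SPEC =====
def Spec_extract_relevant_rules_py (rules_content : String) (column_names : List String) (out : String) : Prop := out = extract_relevant_rules_py_alt rules_content column_names
instance (rules_content : String) (column_names : List String) (out : String) : Decidable (Spec_extract_relevant_rules_py rules_content column_names out) := by unfold Spec_extract_relevant_rules_py; infer_instance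

-- ===== CLAIM (what is proved, stated in full; the proofs are below) =====
def Claim_equal_extract_relevant_rules_py : Prop := ∀ (rules_content : String) (column_names : List String), Dom_extract_relevant_rules_py rules_content column_names → Spec_extract_relevant_rules_py rules_content column_names (extract_relevant_rules_py rules_content column_names)

-- ===== LEMMAS AND PROOFS =====

-- the value B's backward loop stores: index of the first blank line at position ≥ t, else length-1
def pvFb (lines : List String) (t : Nat) : Int :=
  match (lines.drop t).findIdx? (fun l => PySem.Str.strip l = "") with
  | some m => ((t + m : Nat) : Int)
  | none => (lines.length : Int) - 1

lemma pvFb_length (lines : List String) : pvFb lines lines.length = (lines.length : Int) - 1 := by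
  simp [pvFb, List.drop_length]

lemma pvFb_succ (lines : List String) (t : Nat) (ht : t < lines.length) :
    pvFb lines t = if PySem.Str.strip (lines.getD t "") = "" then (t : Int) else pvFb lines (t + 1) := by
  rw [pvFb, pvFb, List.drop_eq_getElem_cons ht, List.findIdx?_cons, List.getD_eq_getElem _ _ ht]
  by_cases hb : PySem.Str.strip lines[t] = "" <;> simp [hb]
  cases (lines.drop (t+1)).findIdx? (fun l => PySem.Str.strip l = "") with
  | some m => simp; omega
  | none => simp

lemma pvFb_le (lines : List String) (t : Nat) : pvFb lines t ≤ (lines.length : Int) - 1 := by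
  rw [pvFb]
  cases h : (lines.drop t).findIdx? (fun l => PySem.Str.strip l = "") with
  | none => simp
  | some m =>
    have := (List.findIdx?_eq_some_iff_findIdx_eq.mp h).1
    simp only [List.length_drop] at this
    simp; omega

lemma pvLe_fb (lines : List String) (t : Nat) (h : (t : Int) ≤ (lines.length : Int) - 1) :
    (t : Int) ≤ pvFb lines t := by
  rw [pvFb]
  cases hf : (lines.drop t).findIdx? (fun l => PySem.Str.strip l = "") with
  | some m => simp
  | none => simp; omega

lemma pvFb_nonblank (lines : List String) (t : Nat) (j : Nat) (h1 : t ≤ j)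
    (h2 : (j : Int) < pvFb lines t) : PySem.Str.strip (lines.getD j "") ≠ "" := by
  rw [pvFb] at h2
  cases hf : (lines.drop t).findIdx? (fun l => PySem.Str.strip l = "") with
  | some m =>
    rw [hf] at h2
    simp only [] at h2
    obtain ⟨hm, hidx⟩ := List.findIdx?_eq_some_iff_findIdx_eq.mp hf
    simp only [List.length_drop] at hm
    have hj : j < lines.length := by omega
    have hjd : j - t < (lines.drop t).length := by simp [List.length_drop]; omega
    have hlt : j - t < (lines.drop t).findIdx (fun l => PySem.Str.strip l = "") := by omega
    have := List.not_of_lt_findIdx hlt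
    rw [List.getElem_drop] at this
    have hjt : t + (j - t) = j := by omega
    rw [List.getD_eq_getElem _ _ hj]
    simpa [hjt] using this
  | none =>
    rw [hf] at h2
    simp only [] at h2
    have hj : j < lines.length := by omega
    have hmem : lines[j] ∈ lines.drop t := by
      have : (lines.drop t)[j - t]'(by simp [List.length_drop]; omega) = lines[j] := by
        rw [List.getElem_drop]; congr 1; omega
      exact this ▸ List.getElem_mem _
    have := List.findIdx?_eq_none_iff.mp hf _ hmem
    rw [List.getD_eq_getElem _ _ hj]
    simpa using this

lemma pvFb_blank_or_last (lines : List String) (t : Nat) :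
    pvFb lines t = (lines.length : Int) - 1 ∨
      PySem.Str.strip (lines.getD (pvFb lines t).toNat "") = "" := by
  rw [pvFb]
  cases hf : (lines.drop t).findIdx? (fun l => PySem.Str.strip l = "") with
  | none => left; rfl
  | some m =>
    right
    obtain ⟨hm, hidx⟩ := List.findIdx?_eq_some_iff_findIdx_eq.mp hf
    simp only [List.length_drop] at hm
    have hgt : t + m < lines.length := by omega
    have hw : List.findIdx (fun l => decide (PySem.Str.strip l = "")) (lines.drop t) < (lines.drop t).length := by
      rw [hidx]; simp only [List.length_drop]; omega
    have := List.findIdx_getElem (w := hw)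
    rw [List.getElem_drop] at this
    simp only [hidx] at this
    rw [List.getD_eq_getElem _ _ (by simpa using hgt)]
    simpa using this

-- characterization of B's backward loop
lemma pvBack_spec (lines : List String) : ∀ (t : Nat), t ≤ lines.length →
    ∀ (acc : List Int), acc.length = lines.length →
    (((PySem.List.pyRange ((t : Int) - 1) (-1) (-1)).foldl (pvB_back lines) (acc, pvFb lines t)).1.length = lines.length ∧
     (∀ j : Nat, j < t →
        ((PySem.List.pyRange ((t : Int) - 1) (-1) (-1)).foldl (pvB_back lines) (acc, pvFb lines t)).1.getD j 0 = pvFb lines (j + 1)) ∧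
     (∀ j : Nat, t ≤ j →
        ((PySem.List.pyRange ((t : Int) - 1) (-1) (-1)).foldl (pvB_back lines) (acc, pvFb lines t)).1.getD j 0 = acc.getD j 0)) := by
  intro t
  induction t with
  | zero =>
    intro _ acc hacc
    rw [PySem.List.pyRange_neg_one_eq_nil (by omega)]
    exact ⟨hacc, fun j hj => absurd hj (by omega), fun j _ => rfl⟩
  | succ t ih =>
    intro ht acc hacc
    have h1 : ((t + 1 : Nat) : Int) - 1 = ((t : Nat) : Int) := by push_cast; ring
    rw [h1, PySem.List.pyRange_neg_one_cons (by omega : (-1:Int) < (t:Int))]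
    rw [List.foldl_cons]
    have hstep : pvB_back lines (acc, pvFb lines (t+1)) ((t:Nat):Int)
        = (acc.set t (pvFb lines (t+1)), pvFb lines t) := by
      rw [pvB_back, pvFb_succ lines t (by omega)]
      simp only [Int.toNat_natCast, PySem.List.pyGetD_natCast]
    rw [hstep]
    have h2 : ((t : Nat) : Int) - 1 = ((t : Nat) : Int) - 1 := rfl
    obtain ⟨hl, hlt, hge⟩ := ih (by omega) (acc.set t (pvFb lines (t+1))) (by simp [hacc])
    refine ⟨hl, ?_, ?_⟩
    · intro j hj
      by_cases hjt : j < t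
      · exact hlt j hjt
      · have hjt' : j = t := by omega
        subst hjt'
        rw [hge j (le_refl _)]
        rw [List.getD_eq_getElem _ _ (by rw [List.length_set]; omega)]
        rw [List.getElem_set_self]
    · intro j hj
      rw [hge j (by omega)]
      by_cases hjl : j < acc.length
      · rw [List.getD_eq_getElem _ _ (by rw [List.length_set]; omega),
            List.getD_eq_getElem _ _ hjl, List.getElem_set_ne (by omega)]
      · rw [List.getD_eq_default _ _ (by rw [List.length_set]; omega),
            List.getD_eq_default _ _ (by omega)]

-- the two loops build the same list of kept lines
lemma pvForward (cols lines : List String) (nxt : List Int)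
    (hn : ∀ j : Nat, j < lines.length → nxt.getD j 0 = pvFb lines (j + 1)) :
    ∀ (k t : Nat), t + k = lines.length →
    ∀ (acc : List String) (b : Bool) (reach : Int),
    (t < lines.length → b = decide ((t : Int) ≤ reach)) →
    reach ≤ (lines.length : Int) - 1 →
    ((t : Int) ≤ reach →
      (∀ j : Nat, t ≤ j → (j : Int) < reach → PySem.Str.strip (lines.getD j "") ≠ "") ∧
      (reach = (lines.length : Int) - 1 ∨ PySem.Str.strip (lines.getD reach.toNat "") = "")) →
    ((lines.drop t).foldl (pvA_step cols) (b, acc)).2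
      = ((PySem.List.pyRange (t : Int) (lines.length : Int)).foldl (pvB_step cols lines nxt) (acc, reach)).1 := by
  intro k
  induction k with
  | zero =>
    intro t hk acc b reach _ _ _
    have ht : t = lines.length := by omega
    subst ht
    rw [List.drop_length, PySem.List.pyRange_one_eq_nil (le_refl _)]
    rfl
  | succ k ih =>
    intro t hk acc b reach hb h2 h3
    have htn : t < lines.length := by omega
    have hbv := hb htn
    subst hbv
    rw [List.drop_eq_getElem_cons htn, List.foldl_cons,
        PySem.List.pyRange_one_cons (by exact_mod_cast htn), List.foldl_cons]
    have hline : PySem.List.pyGetD lines ((t : Nat) : Int) "" = lines[t] := by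
      rw [PySem.List.pyGetD_natCast, List.getD_eq_getElem _ _ htn]
    have hnxt : PySem.List.pyGetD nxt ((t : Nat) : Int) 0 = pvFb lines (t + 1) := by
      rw [PySem.List.pyGetD_natCast, hn t htn]
    have hrange : ((t : Nat) : Int) + 1 = ((t + 1 : Nat) : Int) := by push_cast; ring
    by_cases hrel : cols.any (fun col => PySem.Str.isIn col lines[t]) = true
    · -- relevant line: both append it; A sets include_next, B extends reach
      have hA : pvA_step cols (decide ((t : Int) ≤ reach), acc) lines[t] = (true, acc ++ [lines[t]]) := by
        unfold pvA_step
        rw [if_pos hrel]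
      have hB : pvB_step cols lines nxt (acc, reach) ((t : Nat) : Int)
          = (acc ++ [lines[t]], if reach < pvFb lines (t + 1) then pvFb lines (t + 1) else reach) := by
        simp only [pvB_step, hline, hnxt]
        rw [if_pos hrel]
      rw [hA, hB, hrange]
      have hNle : pvFb lines (t + 1) ≤ (lines.length : Int) - 1 := pvFb_le lines (t + 1)
      by_cases hc : reach < pvFb lines (t + 1)
      · rw [if_pos hc]
        apply ih (t + 1) (by omega)
        · intro h'
          have : ((t + 1 : Nat) : Int) ≤ pvFb lines (t + 1) :=
            pvLe_fb lines (t + 1) (by push_cast; omega)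
          exact (decide_eq_true this).symm
        · exact hNle
        · intro _
          exact ⟨fun j hj1 hj2 => pvFb_nonblank lines (t + 1) j hj1 hj2,
                 pvFb_blank_or_last lines (t + 1)⟩
      · rw [if_neg hc]
        apply ih (t + 1) (by omega)
        · intro h'
          have : ((t + 1 : Nat) : Int) ≤ reach := by
            have := pvLe_fb lines (t + 1) (by push_cast; omega)
            push_cast at this ⊢; omega
          exact (decide_eq_true this).symm
        · exact h2
        · intro hge
          have hbr : (t : Int) ≤ reach := by push_cast at hge; omega
          obtain ⟨hnb, hlast⟩ := h3 hbr
          exact ⟨fun j hj1 hj2 => hnb j (by omega) hj2, hlast⟩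
    · -- not relevant
      by_cases hbr : ((t : Nat) : Int) ≤ reach
      · obtain ⟨hnb, hlast⟩ := h3 hbr
        by_cases hblank : PySem.Str.strip lines[t] = ""
        · -- blank line inside a paragraph: both append "", A drops include_next
          have hA : pvA_step cols (decide ((t : Int) ≤ reach), acc) lines[t] = (false, acc ++ [""]) := by
            unfold pvA_step
            rw [if_neg hrel, if_pos (show ((decide ((t : Int) ≤ reach), acc).1 = true) from decide_eq_true hbr),
                if_neg (show ¬ (PySem.Str.strip lines[t] ≠ "") from not_not_intro hblank)]
          have hB : pvB_step cols lines nxt (acc, reach) ((t : Nat) : Int) = (acc ++ [""], reach) := by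
            simp only [pvB_step, hline]
            rw [if_neg hrel, if_pos (show ((t : Int) ≤ (acc, reach).2) from hbr),
                if_neg (show ¬ (PySem.Str.strip lines[t] ≠ "") from not_not_intro hblank)]
          rw [hA, hB, hrange]
          have hreachle : reach ≤ (t : Int) := by
            by_contra hgt
            exact hnb t (le_refl _) (by omega) (by rw [List.getD_eq_getElem _ _ htn]; exact hblank)
          apply ih (t + 1) (by omega)
          · intro h'
            have : ¬ ((t + 1 : Nat) : Int) ≤ reach := by push_cast; omega
            exact (decide_eq_false this).symm
          · exact h2
          · intro hge; exfalso; push_cast at hge; omega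
        · -- non-blank continuation line: both append it
          have hA : pvA_step cols (decide ((t : Int) ≤ reach), acc) lines[t] = (true, acc ++ [lines[t]]) := by
            unfold pvA_step
            rw [if_neg hrel, if_pos (show ((decide ((t : Int) ≤ reach), acc).1 = true) from decide_eq_true hbr),
                if_pos hblank]
          have hB : pvB_step cols lines nxt (acc, reach) ((t : Nat) : Int) = (acc ++ [lines[t]], reach) := by
            simp only [pvB_step, hline]
            rw [if_neg hrel, if_pos (show ((t : Int) ≤ (acc, reach).2) from hbr), if_pos hblank]
          rw [hA, hB, hrange]
          apply ih (t + 1) (by omega)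
          · intro h'
            have : ((t + 1 : Nat) : Int) ≤ reach := by
              rcases hlast with hl | hl
              · push_cast; omega
              · by_contra hc
                have hrt : reach = (t : Int) := by push_cast at hc; omega
                rw [hrt] at hl
                simp only [Int.toNat_natCast] at hl
                rw [List.getD_eq_getElem _ _ htn] at hl
                exact hblank hl
            exact (decide_eq_true this).symm
          · exact h2
          · intro hge
            exact ⟨fun j hj1 hj2 => hnb j (by omega) hj2, hlast⟩
      · -- irrelevant line outside any paragraph: both skip
        have hA : pvA_step cols (decide ((t : Int) ≤ reach), acc) lines[t]
            = (decide ((t : Int) ≤ reach), acc) := by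
          unfold pvA_step
          rw [if_neg hrel, if_neg (show ¬ ((decide ((t : Int) ≤ reach), acc).1 = true) by
            simpa using hbr)]
        have hB : pvB_step cols lines nxt (acc, reach) ((t : Nat) : Int) = (acc, reach) := by
          simp only [pvB_step, hline]
          rw [if_neg hrel, if_neg (show ¬ ((t : Int) ≤ (acc, reach).2) from hbr)]
        rw [hA, hB, hrange]
        apply ih (t + 1) (by omega)
        · intro h'
          have : ¬ ((t + 1 : Nat) : Int) ≤ reach := by push_cast at hbr ⊢; omega
          rw [decide_eq_false hbr]
          exact (decide_eq_false this).symm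
        · exact h2
        · intro hge; exfalso; push_cast at hge hbr; omega

-- ===== VERDICT (by name: the statement is the Claim_ definition above) =====
theorem extract_relevant_rules_py_spec : Claim_equal_extract_relevant_rules_py := by
  unfold Claim_equal_extract_relevant_rules_py
  intro rules_content column_names _
  unfold Spec_extract_relevant_rules_py
  by_cases hr : rules_content = ""
  · unfold extract_relevant_rules_py extract_relevant_rules_py_alt
    simp [hr]
  · unfold extract_relevant_rules_py extract_relevant_rules_py_alt
    simp only [if_neg hr]
    have key : ∀ (lines : List String),
        (lines.foldl (pvA_step column_names) (false, ([] : List String))).2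
        = ((PySem.List.pyRange 0 (lines.length : Int)).foldl
            (pvB_step column_names lines
              (((PySem.List.pyRange ((lines.length : Int) - 1) (-1) (-1)).foldl (pvB_back lines)
                (List.replicate lines.length 0, (lines.length : Int) - 1)).1))
            ([], -1)).1 := by
      intro lines
      have hfb : ((lines.length : Int) - 1) = pvFb lines lines.length := (pvFb_length lines).symm
      obtain ⟨hlen, hset, _⟩ := pvBack_spec lines lines.length (le_refl _)
        (List.replicate lines.length 0) (by simp)
      rw [← hfb] at hset
      have := pvForward column_names lines _ (fun j hj => hset j hj) lines.length 0
        (by omega) [] false (-1) (by intro _; rfl) (by omega)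
        (by intro h; exact absurd h (by decide))
      simpa using this
    rw [key]
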